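-- pv_equiv track=rewrite | github.com/anarand/sprint3-hsr-dynamicprogramming | recursao.py | verificar_duplicidade_recursiva
-- ===== SOURCE A (Python) =====
-- CAMPOS_VERIFICACAO = ["nome", "telefone", "email", "cpf"]
--
-- def _campos_em_comum(lead: dict, cadastro: dict) -> list:
--     """
--     Retorna os campos com valor idêntico entre lead e cadastro.
--
--     Args:
--         lead    : dicionário do novo lead
--         cadastro: dicionário de um cadastro existente
--
--     Returns:
--         list[str]: nomes dos campos com valores iguais
--     """
--     return [
--         campo
--         for campo in CAMPOS_VERIFICACAO
--         if lead.get(campo) and lead.get(campo) == cadastro.get(campo)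
--     ]
--
-- def verificar_duplicidade_recursiva(
--     novo_lead: dict,
--     cadastros: list,
--     indice: int = 0,
-- ) -> tuple:
--     """
--     Verifica recursivamente se um novo lead já existe na base.
--
--     Estratégia:
--         Caso base : indice >= len(cadastros) → nenhuma duplicata encontrada
--         Passo     : compara o lead com cadastros[indice]
--                     › Se houver campo em comum → duplicata, para a recursão
--                     › Caso contrário           → avança para indice + 1
--
--     Complexidade:
--         Tempo : O(n · k)  — n cadastros, k campos verificados
--         Espaço: O(n)      — profundidade máxima da pilha de recursão
--
--     Args:
--         novo_lead : dicionário com os dados do novo lead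
--         cadastros : lista de cadastros já existentes no sistema
--         indice    : posição atual na lista (não informar na chamada inicial)
--
--     Returns:
--         tuple(bool, dict | None, list[str]):
--             [0] True se duplicata encontrada, False caso contrário
--             [1] Cadastro conflitante (ou None)
--             [2] Lista de campos duplicados (ou lista vazia)
--     """
--     #  Caso base: percorreu toda a lista sem encontrar duplicata
--     if indice >= len(cadastros):
--         return False, None, []
--
--     cadastro_atual = cadastros[indice]
--     campos_dup = _campos_em_comum(novo_lead, cadastro_atual)
--
--     #  Duplicata encontrada: interrompe a recursão
--     if campos_dup:
--         return True, cadastro_atual, campos_dup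
--
--     # Chamada recursiva para o próximo cadastro
--     return verificar_duplicidade_recursiva(novo_lead, cadastros, indice + 1)
-- ===== SOURCE B (Python) =====
-- CAMPOS_VERIFICACAO = ["nome", "telefone", "email", "cpf"]
--
-- def _campos_em_comum(lead: dict, cadastro: dict) -> list:
--     return [
--         campo
--         for campo in CAMPOS_VERIFICACAO
--         if lead.get(campo) and lead.get(campo) == cadastro.get(campo)
--     ]
--
-- def verificar_duplicidade_recursiva(novo_lead: dict, cadastros: list, indice: int = 0) -> tuple:
--     for i in range(indice, len(cadastros)):
--         campos = _campos_em_comum(novo_lead, cadastros[i])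
--         if campos:
--             return True, cadastros[i], campos
--     return False, None, []
-- ===== Notes on version B (the rewrite author's own statement) =====
-- stated objective: simpler
-- what changed: Replaced the O(n)-stack tail recursion over indice with a plain for-loop over range(indice, len(cadastros)) that returns at the first cadastro sharing a field; same helper and truthiness guard, O(1) stack and no RecursionError risk on long lists.
import Mathlib
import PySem

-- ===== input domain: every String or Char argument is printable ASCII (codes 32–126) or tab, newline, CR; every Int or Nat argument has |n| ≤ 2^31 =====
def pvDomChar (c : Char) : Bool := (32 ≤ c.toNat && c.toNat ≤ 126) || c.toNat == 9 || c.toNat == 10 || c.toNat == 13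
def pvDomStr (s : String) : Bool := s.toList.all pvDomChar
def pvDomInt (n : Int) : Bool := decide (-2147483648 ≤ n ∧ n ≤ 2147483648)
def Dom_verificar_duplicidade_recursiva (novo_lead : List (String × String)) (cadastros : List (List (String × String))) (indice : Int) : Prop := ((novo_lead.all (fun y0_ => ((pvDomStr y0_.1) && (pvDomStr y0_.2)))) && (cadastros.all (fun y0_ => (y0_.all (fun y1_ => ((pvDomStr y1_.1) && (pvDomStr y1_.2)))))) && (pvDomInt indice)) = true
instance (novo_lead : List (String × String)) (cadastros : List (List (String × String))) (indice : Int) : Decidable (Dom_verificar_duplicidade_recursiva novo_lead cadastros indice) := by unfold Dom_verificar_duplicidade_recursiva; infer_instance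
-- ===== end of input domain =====

-- B replaces A's tail recursion over `indice` with a single loop over range(indice, len(cadastros)):
-- same values, O(1) stack instead of O(n) recursion depth (objective: simpler).

-- shared module context: CAMPOS_VERIFICACAO and the helper _campos_em_comum (both Pythons use the same helper verbatim)
def CAMPOS_VERIFICACAO : List String := ["nome", "telefone", "email", "cpf"]

-- dict.get on the association list: first match (insertion order)
def pvDictGet (d : List (String × String)) (k : String) : Option String :=
  (d.find? (fun p => p.1 == k)).map (·.2)

-- lead.get(campo) and lead.get(campo) == cadastro.get(campo): truthy (non-None, non-empty) and equal
def campos_em_comum (lead cadastro : List (String × String)) : List String :=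
  CAMPOS_VERIFICACAO.filter (fun campo =>
    match pvDictGet lead campo with
    | none => false
    | some v => v ≠ "" && pvDictGet cadastro campo == some v)

-- ===== PORT A =====
def verificar_duplicidade_recursiva (novo_lead : List (String × String)) (cadastros : List (List (String × String))) (indice : Int) : Bool × (Option (List (String × String))) × List String :=
  if h : (cadastros.length : Int) ≤ indice then (false, none, [])
  else
    match PySem.List.pyGet? cadastros indice with
    | none => (false, none, [])  -- IndexError in Python (indice < -len); excluded by Pre_
    | some cadastro_atual =>
      let campos_dup := campos_em_comum novo_lead cadastro_atual
      if campos_dup ≠ [] then (true, some cadastro_atual, campos_dup)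
      else verificar_duplicidade_recursiva novo_lead cadastros (indice + 1)
termination_by ((cadastros.length : Int) - indice).toNat
decreasing_by omega

-- ===== PORT B =====
-- the for-loop body: iterate over the precomputed index list
def vdr_loop (novo_lead : List (String × String)) (cadastros : List (List (String × String))) : List Int → Bool × (Option (List (String × String))) × List String
  | [] => (false, none, [])
  | i :: rest =>
    match PySem.List.pyGet? cadastros i with
    | none => (false, none, [])  -- IndexError in Python; excluded by Pre_
    | some c =>
      let campos := campos_em_comum novo_lead c
      if campos ≠ [] then (true, some c, campos)
      else vdr_loop novo_lead cadastros rest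

def verificar_duplicidade_recursiva_alt (novo_lead : List (String × String)) (cadastros : List (List (String × String))) (indice : Int) : Bool × (Option (List (String × String))) × List String :=
  vdr_loop novo_lead cadastros (PySem.List.pyRange indice (cadastros.length : Int) 1)

-- ===== PRECONDITION & SPEC =====
-- Pre_ excludes only inputs where Python A raises IndexError: indice < -len(cadastros) (B raises there too).
def Pre_verificar_duplicidade_recursiva (novo_lead : List (String × String)) (cadastros : List (List (String × String))) (indice : Int) : Prop :=
  -(cadastros.length : Int) ≤ indice
instance (novo_lead : List (String × String)) (cadastros : List (List (String × String))) (indice : Int) : Decidable (Pre_verificar_duplicidade_recursiva novo_lead cadastros indice) := by unfold Pre_verificar_duplicidade_recursiva; infer_instance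

def pvWitness_verificar_duplicidade_recursiva : (List (String × String)) × (List (List (String × String))) × Int :=
  ([("nome", "ana")], [[("nome", "bia")], [("nome", "ana")]], 0)

def Spec_verificar_duplicidade_recursiva (novo_lead : List (String × String)) (cadastros : List (List (String × String))) (indice : Int) (out : Bool × (Option (List (String × String))) × List String) : Prop := out = verificar_duplicidade_recursiva_alt novo_lead cadastros indice
instance (novo_lead : List (String × String)) (cadastros : List (List (String × String))) (indice : Int) (out : Bool × (Option (List (String × String))) × List String) : Decidable (Spec_verificar_duplicidade_recursiva novo_lead cadastros indice out) := by unfold Spec_verificar_duplicidade_recursiva; infer_instance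

-- ===== CLAIM (what is proved, stated in full; the proofs are below) =====
def Claim_equal_verificar_duplicidade_recursiva : Prop := ∀ (novo_lead : List (String × String)) (cadastros : List (List (String × String))) (indice : Int), Dom_verificar_duplicidade_recursiva novo_lead cadastros indice → Pre_verificar_duplicidade_recursiva novo_lead cadastros indice → Spec_verificar_duplicidade_recursiva novo_lead cadastros indice (verificar_duplicidade_recursiva novo_lead cadastros indice)

-- ===== LEMMAS AND PROOFS =====

theorem vdr_eq_loop (novo_lead : List (String × String)) (cadastros : List (List (String × String))) (indice : Int)
    (hpre : -(cadastros.length : Int) ≤ indice) :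
    verificar_duplicidade_recursiva novo_lead cadastros indice =
      vdr_loop novo_lead cadastros (PySem.List.pyRange indice (cadastros.length : Int) 1) := by
  rw [verificar_duplicidade_recursiva]
  by_cases h : (cadastros.length : Int) ≤ indice
  · rw [PySem.List.pyRange_one_eq_nil h]
    simp [h, vdr_loop]
  · have hlt : indice < (cadastros.length : Int) := lt_of_not_ge h
    rw [PySem.List.pyRange_one_cons hlt]
    simp only [h, dite_false]
    rw [vdr_loop]
    cases hg : PySem.List.pyGet? cadastros indice with
    | none => rfl
    | some c =>
      simp only
      by_cases hc : campos_em_comum novo_lead c ≠ []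
      · simp [hc]
      · simp only [hc, if_false]
        exact vdr_eq_loop novo_lead cadastros (indice + 1) (by omega)
termination_by ((cadastros.length : Int) - indice).toNat
decreasing_by omega

-- ===== VERDICT (by name: the statement is the Claim_ definition above) =====
theorem verificar_duplicidade_recursiva_spec : Claim_equal_verificar_duplicidade_recursiva := by
  intro novo_lead cadastros indice _ hpre
  exact vdr_eq_loop novo_lead cadastros indice hpre
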